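-- pv_equiv track=rewrite | github.com/pauliacomi/pyGAPS | src/pygaps/utilities/string_utilities.py | convert_chemformula
-- ===== SOURCE A (Python) =====
-- def convert_chemformula(string: str) -> str:
--     """
--     Convert a chemical formula string to a matplotlib parsable format (latex).
--
--     Parameters
--     ----------
--     string or Adsorbate: str
--         String to process.
--
--     Returns
--     -------
--     str
--         Processed string.
--     """
--     result = getattr(string, 'formula', None)
--     if result is None:
--         result = ""
--         number_processing = False
--         for i in string:
--             if i.isdigit():
--                 if not number_processing:
--                     result += '_{'
--                     number_processing = True
--             else:
--                 if number_processing: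
--                     result += '}'
--                     number_processing = False
--             result += i
--
--         if number_processing:
--             result += '}'
--
--     return f'${result}$'
-- ===== SOURCE B (Python) =====
-- def convert_chemformula(string: str) -> str:
--     # a str never has a 'formula' attribute, so A's getattr guard is always None for str input
--     parts = []
--     i, n = 0, len(string)
--     while i < n:
--         if string[i].isdigit():
--             j = i
--             while j < n and string[j].isdigit():
--                 j += 1
--             parts.append('_{' + string[i:j] + '}')
--             i = j
--         else:
--             parts.append(string[i])
--             i += 1
--     return f'${"".join(parts)}$'
-- ===== Notes on version B (the rewrite author's own statement) =====
-- stated objective: alternative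
-- what changed: Replaced A's character-by-character scan with a number_processing open/close flag by a run-based scan that consumes each maximal digit run in one inner step and emits it as a single subscript group, joining collected parts at the end.
import Mathlib
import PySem

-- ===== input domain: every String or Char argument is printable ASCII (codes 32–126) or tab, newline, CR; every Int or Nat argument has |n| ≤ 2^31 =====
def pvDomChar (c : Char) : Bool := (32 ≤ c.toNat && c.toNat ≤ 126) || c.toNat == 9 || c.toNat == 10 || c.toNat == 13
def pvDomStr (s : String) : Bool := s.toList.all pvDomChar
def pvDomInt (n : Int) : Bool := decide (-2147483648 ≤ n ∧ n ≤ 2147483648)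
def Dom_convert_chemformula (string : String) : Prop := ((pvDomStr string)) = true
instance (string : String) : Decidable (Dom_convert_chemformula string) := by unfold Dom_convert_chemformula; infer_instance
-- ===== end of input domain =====

-- B replaces A's character-by-character scan with a stateful open/close flag by a
-- run-based scan that consumes each maximal digit run in one step and emits it as one subscript group (objective: alternative).
-- On a str argument getattr(string, 'formula', None) is always None, so both ports omit that branch.

-- ===== PORT A =====
-- the body of A's for-loop; state: (result string built so far, number_processing flag)
def pvStepA (st : String × Bool) (i : Char) : String × Bool :=
  let st :=
    if i.isDigit then
      if st.2 = false then (st.1 ++ "_{", true) else st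
    else
      if st.2 = true then (st.1 ++ "}", false) else st
  (st.1 ++ i.toString, st.2)

def convert_chemformula (string : String) : String :=
  let st := string.toList.foldl pvStepA ("", false)
  let result := if st.2 then st.1 ++ "}" else st.1
  "$" ++ result ++ "$"

-- ===== PORT B =====
-- the outer while-loop of Source B: at a digit, consume the whole maximal digit run
-- (the inner while j loop = takeWhile/dropWhile) and emit it as one subscript group
def pvSubDigits : List Char → List Char
  | [] => []
  | c :: cs =>
    if c.isDigit then
      '_' :: '{' :: c :: cs.takeWhile Char.isDigit ++ '}' :: pvSubDigits (cs.dropWhile Char.isDigit)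
    else
      c :: pvSubDigits cs
termination_by l => l.length
decreasing_by
  · have := List.length_dropWhile_le (p := Char.isDigit) (l := cs); simp; omega
  · simp

def convert_chemformula_alt (string : String) : String :=
  "$" ++ String.ofList (pvSubDigits string.toList) ++ "$"

-- ===== PRECONDITION & SPEC =====
def Spec_convert_chemformula (string : String) (out : String) : Prop := out = convert_chemformula_alt string
instance (string : String) (out : String) : Decidable (Spec_convert_chemformula string out) := by unfold Spec_convert_chemformula; infer_instance

-- ===== CLAIM (what is proved, stated in full; the proofs are below) =====
def Claim_equal_convert_chemformula : Prop := ∀ (string : String), Dom_convert_chemformula string → Spec_convert_chemformula string (convert_chemformula string)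

-- ===== LEMMAS AND PROOFS =====

-- A's loop, re-expressed as structural recursion over the remaining characters
def pvGoA : Bool → List Char → List Char
  | true, [] => ['}']
  | false, [] => []
  | false, c :: cs => if c.isDigit then '_' :: '{' :: c :: pvGoA true cs else c :: pvGoA false cs
  | true, c :: cs => if c.isDigit then c :: pvGoA true cs else '}' :: c :: pvGoA false cs

theorem pvGoA_true (cs : List Char) :
    pvGoA true cs = cs.takeWhile Char.isDigit ++ '}' :: pvGoA false (cs.dropWhile Char.isDigit) := by
  induction cs with
  | nil => simp [pvGoA]
  | cons c cs ih =>
    by_cases h : c.isDigit <;>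
      simp [pvGoA, h, ih]

theorem pvGoA_false_eq_subDigits (l : List Char) : pvGoA false l = pvSubDigits l := by
  induction l using pvSubDigits.induct with
  | case1 => simp [pvGoA, pvSubDigits]
  | case2 c cs h ih => rw [pvGoA, pvSubDigits]; simp [h, pvGoA_true, ih]
  | case3 c cs h ih => rw [pvGoA, pvSubDigits]; simp [h, ih]

def pvFinish (p : String × Bool) : String := if p.2 then p.1 ++ "}" else p.1

theorem pvFoldA (l : List Char) : ∀ (res : String) (flag : Bool),
    (pvFinish (l.foldl pvStepA (res, flag))).toList = res.toList ++ pvGoA flag l := by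
  induction l with
  | nil =>
    intro res flag
    cases flag <;> simp [pvFinish, pvGoA, String.toList_append]
  | cons c cs ih =>
    intro res flag
    rw [List.foldl_cons]
    cases flag <;> by_cases h : c.isDigit <;>
      simp only [pvStepA, h, Bool.true_eq_false, Bool.false_eq_true, if_true, if_false] <;>
      rw [ih] <;> simp [pvGoA, h, String.toList_append, Char.toString]

theorem convert_chemformula_spec : Claim_equal_convert_chemformula := by
  intro s _
  unfold Spec_convert_chemformula convert_chemformula convert_chemformula_alt
  apply String.toList_inj.mp
  have h := pvFoldA s.toList "" false
  simp only [String.toList_append, String.toList_ofList, String.toList_empty,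
    List.nil_append, pvFinish] at h ⊢
  rw [← pvGoA_false_eq_subDigits, ← h]
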